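-- pv_equiv track=rewrite | github.com/damiha/CalculatorGPTClone | backend/infix_parser.py | to_infix_tokens
-- ===== SOURCE A (Python) =====
-- from typing import List
--
-- def to_infix_tokens(infix_str: str, precedence_order: dict) -> List[str]:
--
--     last_was_digit = False
--
--     str_with_whitespaces = ""
--
--     operators_with_whitespaces = set(precedence_order.keys()).union({"(", ")"})
--     digits = set(map(lambda d: str(d), range(10)))
--
--     for c in infix_str:
--
--         if c in operators_with_whitespaces:
--             str_with_whitespaces += f" {c} "
--             last_was_digit = False
--
--         elif c in digits or c == ".":
--             if last_was_digit:
--                 str_with_whitespaces += f"{c}"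
--             else:
--                 last_was_digit = True
--                 str_with_whitespaces += f" {c}"
--
--
--     str_with_whitespaces += " "
--
--     infix_tokens = list(filter(lambda t: len(t) > 0, str_with_whitespaces.split(" ")))
--
--     return infix_tokens
-- ===== SOURCE B (Python) =====
-- from typing import List
--
-- def to_infix_tokens(infix_str: str, precedence_order: dict) -> List[str]:
--     operators = set(precedence_order.keys()) | {"(", ")"}
--     tokens = []
--     buf = ""
--     for c in infix_str:
--         if c in operators:
--             if buf:
--                 tokens.append(buf)
--                 buf = ""
--             tokens.append(c)
--         elif c.isdigit() or c == ".":
--             buf += c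
--     if buf:
--         tokens.append(buf)
--     return tokens
-- ===== Notes on version B (the rewrite author's own statement) =====
-- stated objective: idiomatic
-- what changed: B tokenizes in one pass with a token list and a number buffer (flush on operators and at the end) instead of A's building a space-padded string and re-splitting it on spaces.
-- intended difference: When the one-space string " " is an operator key and the input contains a space, A's split-on-space trick silently drops that operator (e.g. A('1 2',{' ':1}) = ['1','2']) while B emits it as a token (['1',' ','2']), which is the intended treatment of a declared operator. — e.g. on to_infix_tokens("1 2", [(" ", 1)]): A returns ["1", "2"], B returns ["1", " ", "2"]
import Mathlib
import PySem

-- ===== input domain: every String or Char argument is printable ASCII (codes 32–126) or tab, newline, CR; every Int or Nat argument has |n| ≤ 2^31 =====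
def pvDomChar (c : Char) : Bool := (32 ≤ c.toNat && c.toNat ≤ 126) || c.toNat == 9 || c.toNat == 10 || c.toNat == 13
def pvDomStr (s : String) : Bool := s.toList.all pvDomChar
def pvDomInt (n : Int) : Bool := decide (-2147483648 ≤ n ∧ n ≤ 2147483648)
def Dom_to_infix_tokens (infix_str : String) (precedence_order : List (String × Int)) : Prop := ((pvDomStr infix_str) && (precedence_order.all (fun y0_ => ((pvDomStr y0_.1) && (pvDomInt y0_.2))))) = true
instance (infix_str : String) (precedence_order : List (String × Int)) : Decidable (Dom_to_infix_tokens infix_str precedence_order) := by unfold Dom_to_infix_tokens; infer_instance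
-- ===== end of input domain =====

-- B replaces A's build-a-space-padded-string-then-split tokenizer by the idiomatic one-pass
-- token-list + number-buffer loop (same cost); strings are modelled as their char lists (exact).

-- set(precedence_order.keys()) | {"(", ")"}  (both Pythons compute this same set)
def pvOps (precedence_order : List (String × Int)) : PySem.Set String :=
  PySem.Set.add (PySem.Set.add (PySem.Set.ofList (precedence_order.map Prod.fst)) "(") ")"

-- ===== PORT A =====
-- set(map(lambda d: str(d), range(10)))
def pvDigitsA : PySem.Set String :=
  PySem.Set.ofList ((PySem.List.pyRange 0 10 1).map (fun d => PySem.Int.toStr d))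

-- loop body of A: state (last_was_digit, str_with_whitespaces)
def pvStepA (ops : PySem.Set String) : (Bool × List Char) → Char → (Bool × List Char) :=
  fun st c =>
    if PySem.Set.contains ops (String.ofList [c]) then (false, st.2 ++ [' ', c, ' '])
    else if PySem.Set.contains pvDigitsA (String.ofList [c]) || c = '.' then
      (if st.1 then (st.1, st.2 ++ [c]) else (true, st.2 ++ [' ', c]))
    else st

def to_infix_tokens (infix_str : String) (precedence_order : List (String × Int)) : List String :=
  let st := infix_str.toList.foldl (pvStepA (pvOps precedence_order)) (false, [])
  let s := st.2 ++ [' ']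
  (((PySem.Chars.splitOn s [' ']).filter (fun t => decide (0 < t.length))).map String.ofList)

-- ===== PORT B =====
-- loop body of B: state (tokens, buf); flush buf on operators, extend it on digits/'.'
def pvStepB (ops : PySem.Set String) : (List (List Char) × List Char) → Char → (List (List Char) × List Char) :=
  fun st c =>
    if PySem.Set.contains ops (String.ofList [c]) then
      ((if st.2 ≠ [] then st.1 ++ [st.2] else st.1) ++ [[c]], [])
    else if PySem.Chars.isdigit c || c = '.' then (st.1, st.2 ++ [c])
    else st

def to_infix_tokens_alt (infix_str : String) (precedence_order : List (String × Int)) : List String :=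
  let st := infix_str.toList.foldl (pvStepB (pvOps precedence_order)) ([], [])
  ((if st.2 ≠ [] then st.1 ++ [st.2] else st.1).map String.ofList)

-- ===== PRECONDITION & SPEC =====
-- When " " is an operator key and the input contains a space, A's split-on-space trick silently
-- drops that operator from the token list while B emits it as a token, which is the intended
-- treatment of a declared operator.
def D_to_infix_tokens (infix_str : String) (precedence_order : List (String × Int)) : Prop :=
  (∃ p ∈ precedence_order, p.1 = " ") ∧ ' ' ∈ infix_str.toList
instance (infix_str : String) (precedence_order : List (String × Int)) : Decidable (D_to_infix_tokens infix_str precedence_order) := by unfold D_to_infix_tokens; infer_instance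

def Spec_to_infix_tokens (infix_str : String) (precedence_order : List (String × Int)) (out : List String) : Prop := ¬ D_to_infix_tokens infix_str precedence_order → out = to_infix_tokens_alt infix_str precedence_order
instance (infix_str : String) (precedence_order : List (String × Int)) (out : List String) : Decidable (Spec_to_infix_tokens infix_str precedence_order out) := by unfold Spec_to_infix_tokens; infer_instance

def pvDiffWitness_to_infix_tokens : String × (List (String × Int)) := ("1 2", [(" ", 1)])
def pvDiffWitnessOut_to_infix_tokens : (List String) × (List String) := (["1", "2"], ["1", " ", "2"])

-- ===== CLAIM (what is proved, stated in full; the proofs are below) =====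
def Claim_unchanged_to_infix_tokens : Prop := ∀ (infix_str : String) (precedence_order : List (String × Int)), Dom_to_infix_tokens infix_str precedence_order → Spec_to_infix_tokens infix_str precedence_order (to_infix_tokens infix_str precedence_order)
def Claim_changed_to_infix_tokens : Prop := Dom_to_infix_tokens (pvDiffWitness_to_infix_tokens.1) (pvDiffWitness_to_infix_tokens.2) ∧ D_to_infix_tokens (pvDiffWitness_to_infix_tokens.1) (pvDiffWitness_to_infix_tokens.2) ∧ to_infix_tokens (pvDiffWitness_to_infix_tokens.1) (pvDiffWitness_to_infix_tokens.2) = pvDiffWitnessOut_to_infix_tokens.1 ∧ to_infix_tokens_alt (pvDiffWitness_to_infix_tokens.1) (pvDiffWitness_to_infix_tokens.2) = pvDiffWitnessOut_to_infix_tokens.2 ∧ pvDiffWitnessOut_to_infix_tokens.1 ≠ pvDiffWitnessOut_to_infix_tokens.2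

def Claim_exact_to_infix_tokens : Prop := ∀ (infix_str : String) (precedence_order : List (String × Int)), Dom_to_infix_tokens infix_str precedence_order → D_to_infix_tokens infix_str precedence_order → to_infix_tokens infix_str precedence_order ≠ to_infix_tokens_alt infix_str precedence_order

-- ===== LEMMAS AND PROOFS =====

-- simple model of splitting on a single space
def mySplit : List Char → List (List Char)
  | [] => [[]]
  | c :: rest => if c = ' ' then [] :: mySplit rest else (mySplit rest).modifyHead (c :: ·)

lemma mySplit_ne_nil (l : List Char) : mySplit l ≠ [] := by
  cases l with
  | nil => simp [mySplit]
  | cons c rest =>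
    simp only [mySplit]
    split_ifs <;> simp [List.modifyHead]
    · cases h : mySplit rest with
      | nil => exact absurd h (mySplit_ne_nil rest)
      | cons a t => simp

lemma splitOn_go_space (fuel : Nat) (l cur : List Char) (acc : List (List Char))
    (h : l.length < fuel) :
    PySem.Chars.splitOn.go [' '] fuel l cur acc =
      acc.reverse ++ (mySplit l).modifyHead (cur.reverse ++ ·) := by
  induction fuel generalizing l cur acc with
  | zero => omega
  | succ fuel ih =>
    cases l with
    | nil => simp [PySem.Chars.splitOn.go, mySplit]
    | cons c rest =>
      simp only [PySem.Chars.splitOn.go]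
      by_cases hc : c = ' '
      · subst hc
        rw [if_pos (by simp [List.isPrefixOf])]
        simp only [List.length_cons, List.length_nil, List.drop_succ_cons, List.drop_zero]
        rw [ih rest [] (List.reverse cur :: acc) (by simpa using Nat.lt_of_succ_lt_succ h)]
        simp only [mySplit, List.reverse_cons, List.append_assoc]
        cases mySplit rest <;> simp
      · rw [if_neg (by simp [List.isPrefixOf]; exact fun h' => hc h'.symm)]
        rw [ih rest (c :: cur) acc (by simpa using Nat.lt_of_succ_lt_succ h)]
        simp only [mySplit, if_neg hc]
        congr 1
        cases hms : mySplit rest with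
        | nil => exact absurd hms (mySplit_ne_nil rest)
        | cons a t => simp [List.modifyHead]

lemma splitOn_space (l : List Char) :
    PySem.Chars.splitOn l [' '] = mySplit l := by
  show PySem.Chars.splitOn.go [' '] (l.length + 1) l [] [] = mySplit l
  rw [splitOn_go_space _ _ _ _ (by omega)]
  cases hms : mySplit l with
  | nil => exact absurd hms (mySplit_ne_nil l)
  | cons a t => simp [List.modifyHead]

-- character arithmetic
lemma char_eq_iff_toNat (c d : Char) : c = d ↔ c.toNat = d.toNat := by
  rw [Char.ext_iff, ← UInt32.toNat_inj]; exact Iff.rfl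

lemma char_le_iff_toNat (c d : Char) : (c ≤ d) ↔ (c.toNat ≤ d.toNat) := by
  rw [Char.le_def, UInt32.le_iff_toNat_le]; exact Iff.rfl

lemma ofList_single_eq_iff (c d : Char) : (String.ofList [c] = String.ofList [d]) ↔ c = d := by
  constructor
  · intro h; have h2 := congrArg String.toList h; simpa using h2
  · rintro rfl; rfl

lemma mem_digits_iff (c : Char) :
    String.ofList [c] ∈ (["0","1","2","3","4","5","6","7","8","9"] : List String) ↔
      (48 ≤ c.toNat ∧ c.toNat ≤ 57) := by
  simp only [List.mem_cons, List.not_mem_nil, or_false,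
    show ("0":String) = String.ofList ['0'] from rfl,
    show ("1":String) = String.ofList ['1'] from rfl,
    show ("2":String) = String.ofList ['2'] from rfl,
    show ("3":String) = String.ofList ['3'] from rfl,
    show ("4":String) = String.ofList ['4'] from rfl,
    show ("5":String) = String.ofList ['5'] from rfl,
    show ("6":String) = String.ofList ['6'] from rfl,
    show ("7":String) = String.ofList ['7'] from rfl,
    show ("8":String) = String.ofList ['8'] from rfl,
    show ("9":String) = String.ofList ['9'] from rfl,
    ofList_single_eq_iff, char_eq_iff_toNat,
    show ('0').toNat = 48 from rfl, show ('1').toNat = 49 from rfl,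
    show ('2').toNat = 50 from rfl, show ('3').toNat = 51 from rfl,
    show ('4').toNat = 52 from rfl, show ('5').toNat = 53 from rfl,
    show ('6').toNat = 54 from rfl, show ('7').toNat = 55 from rfl,
    show ('8').toNat = 56 from rfl, show ('9').toNat = 57 from rfl]
  omega

-- A's digit-set test agrees with B's isdigit test
lemma digit_test (c : Char) :
    PySem.Set.contains pvDigitsA (String.ofList [c]) = (PySem.Chars.isdigit c) := by
  have hds : pvDigitsA = (["0","1","2","3","4","5","6","7","8","9"] : List String) := by decide
  rw [PySem.Set.contains, hds]
  have hc : (["0","1","2","3","4","5","6","7","8","9"] : List String).contains (String.ofList [c])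
      = decide (String.ofList [c] ∈ (["0","1","2","3","4","5","6","7","8","9"] : List String)) := by
    simp
  rw [hc]
  by_cases hd : 48 ≤ c.toNat ∧ c.toNat ≤ 57
  · rw [decide_eq_true ((mem_digits_iff c).mpr hd)]
    simp only [PySem.Chars.isdigit, char_le_iff_toNat '0' c, char_le_iff_toNat c '9']
    symm
    simpa using hd
  · rw [decide_eq_false (fun hm => hd ((mem_digits_iff c).mp hm))]
    simp only [PySem.Chars.isdigit, char_le_iff_toNat '0' c, char_le_iff_toNat c '9']
    symm
    simpa using fun h1 h2 => hd ⟨h1, h2⟩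

lemma digit_or_dot_ne_space (c : Char) (h : (PySem.Chars.isdigit c || c = '.') = true) : c ≠ ' ' := by
  rintro rfl
  simp [PySem.Chars.isdigit] at h

lemma contains_pvOps_iff (po : List (String × Int)) (s : String) :
    PySem.Set.contains (pvOps po) s = true ↔ (s ∈ po.map Prod.fst ∨ s = "(" ∨ s = ")") := by
  have hc : PySem.Set.contains (pvOps po) s = decide (s ∈ pvOps po) := by
    simp [PySem.Set.contains]
  rw [hc]
  simp only [decide_eq_true_eq, pvOps, PySem.Set.mem_add, PySem.Set.mem_ofList, or_assoc]

-- the token-run extractor: split on ' ' and keep the nonempty pieces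
def Ftok (l : List Char) : List (List Char) := (mySplit l).filter (fun t => decide (0 < t.length))

lemma mySplit_append_space (x y : List Char) :
    mySplit (x ++ ' ' :: y) = mySplit x ++ mySplit y := by
  induction x with
  | nil => simp [mySplit]
  | cons c x ih =>
    simp only [List.cons_append, mySplit, ih]
    split_ifs
    · rfl
    · cases hms : mySplit x with
      | nil => exact absurd hms (mySplit_ne_nil x)
      | cons a t => simp [List.modifyHead]

lemma mySplit_spaceless (buf : List Char) (h : ∀ c ∈ buf, c ≠ ' ') : mySplit buf = [buf] := by
  induction buf with
  | nil => rfl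
  | cons c r ih =>
    simp only [mySplit, if_neg (h c (List.mem_cons_self ..))]
    rw [ih (fun d hd => h d (List.mem_cons_of_mem _ hd))]
    rfl

lemma Ftok_append_space (x y : List Char) : Ftok (x ++ ' ' :: y) = Ftok x ++ Ftok y := by
  simp [Ftok, mySplit_append_space, List.filter_append]

lemma Ftok_spaceless (buf : List Char) (h : ∀ c ∈ buf, c ≠ ' ') :
    Ftok buf = if buf = [] then [] else [buf] := by
  rw [Ftok, mySplit_spaceless buf h]
  cases buf with
  | nil => rfl
  | cons c r => simp [List.filter]

def EndsOk (base : List Char) : Prop := base = [] ∨ ∃ b, base = b ++ [' ']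

lemma Ftok_master (base buf y : List Char) (hE : EndsOk base) (hs : ∀ c ∈ buf, c ≠ ' ') :
    Ftok (base ++ (buf ++ ' ' :: y)) =
      Ftok base ++ (if buf = [] then [] else [buf]) ++ Ftok y := by
  rcases hE with rfl | ⟨b, rfl⟩
  · rw [List.nil_append, Ftok_append_space, Ftok_spaceless buf hs]
    simp [Ftok, mySplit]
  · have h1 : (b ++ [' ']) ++ (buf ++ ' ' :: y) = b ++ ' ' :: (buf ++ ' ' :: y) := by simp
    rw [h1, Ftok_append_space, Ftok_append_space, Ftok_spaceless buf hs]
    have h2 : b ++ [' '] = b ++ ' ' :: ([] : List Char) := by simp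
    rw [h2, Ftok_append_space]
    simp [Ftok, mySplit]

-- loop invariant: A's space-padded string splits into B's emitted tokens plus its open buffer
lemma mainLoop (ops : PySem.Set String) (cs : List Char)
    (H : ∀ c ∈ cs, PySem.Set.contains ops (String.ofList [c]) = true → c ≠ ' ') :
    ∀ (base buf : List Char) (toks : List (List Char)),
      EndsOk base → (∀ c ∈ buf, c ≠ ' ') → Ftok base = toks →
      Ftok ((cs.foldl (pvStepA ops) (decide (buf ≠ []), base ++ buf)).2 ++ [' ']) =
        (if (cs.foldl (pvStepB ops) (toks, buf)).2 ≠ [] then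
          (cs.foldl (pvStepB ops) (toks, buf)).1 ++ [(cs.foldl (pvStepB ops) (toks, buf)).2]
        else (cs.foldl (pvStepB ops) (toks, buf)).1) := by
  induction cs with
  | nil =>
    intro base buf toks hE hs htoks
    clear H
    simp only [List.foldl_nil]
    have h1 : (base ++ buf) ++ [' '] = base ++ (buf ++ ' ' :: []) := by simp
    rw [h1, Ftok_master base buf [] hE hs, htoks]
    have h0 : Ftok [] = [] := rfl
    cases buf <;> simp [h0]
  | cons c cs ih =>
    intro base buf toks hE hs htoks
    have Htail : ∀ d ∈ cs, PySem.Set.contains ops (String.ofList [d]) = true → d ≠ ' ' :=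
      fun d hd => H d (List.mem_cons_of_mem _ hd)
    simp only [List.foldl_cons, pvStepA, pvStepB]
    by_cases hop : PySem.Set.contains ops (String.ofList [c]) = true
    · have hcsp : c ≠ ' ' := H c (List.mem_cons_self ..) hop
      simp only [hop, if_true]
      have hnew : (base ++ buf) ++ [' ', c, ' '] = (base ++ (buf ++ ' ' :: (c :: [' ']))) ++ ([] : List Char) := by
        simp
      have hFc : Ftok (c :: [' ']) = [[c]] := by
        have : (c :: [' ']) = [] ++ ([c] ++ ' ' :: []) := by simp
        rw [this, Ftok_master [] [c] [] (Or.inl rfl) (by simpa using hcsp)]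
        simp [Ftok, mySplit]
      have hFnew : Ftok (base ++ (buf ++ ' ' :: (c :: [' ']))) =
          (if buf ≠ [] then toks ++ [buf] else toks) ++ [[c]] := by
        rw [Ftok_master base buf (c :: [' ']) hE hs, htoks, hFc]
        cases buf <;> simp
      have := ih Htail (base ++ (buf ++ ' ' :: (c :: [' ']))) []
          ((if buf ≠ [] then toks ++ [buf] else toks) ++ [[c]])
          (Or.inr ⟨base ++ buf ++ [' ', c], by simp⟩) (by simp) hFnew
      simpa [hnew] using this
    · simp only [Bool.not_eq_true] at hop
      simp only [hop, Bool.false_eq_true, if_false, digit_test]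
      by_cases hd : (PySem.Chars.isdigit c || c = '.') = true
      · have hcsp : c ≠ ' ' := digit_or_dot_ne_space c hd
        simp only [hd, if_true]
        by_cases hbuf : buf = []
        · subst hbuf
          simp only [ne_eq, not_true_eq_false, decide_false, Bool.false_eq_true,
            if_false, List.append_nil]
          have hbase : Ftok (base ++ [' ']) = toks := by
            have h1 : base ++ [' '] = base ++ (([] : List Char) ++ ' ' :: []) := by simp
            rw [h1, Ftok_master base [] [] hE (by simp)]
            simpa [Ftok, mySplit] using htoks
          have := ih Htail (base ++ [' ']) [c] toks (Or.inr ⟨base, rfl⟩)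
            (by simpa using hcsp) hbase
          simpa [List.append_assoc] using this
        · simp only [ne_eq, hbuf, not_false_eq_true, decide_true, if_true]
          have := ih Htail base (buf ++ [c]) toks hE
            (fun d hd' => by
              rcases List.mem_append.mp hd' with h' | h'
              · exact hs d h'
              · simpa [List.mem_singleton.mp h'] using hcsp) htoks
          simpa [List.append_assoc, hbuf] using this
      · simp only [hd, Bool.false_eq_true, if_false]
        exact ih Htail base buf toks hE hs htoks

-- ===== VERDICT (by name: the statement is the Claim_ definition above) =====
theorem to_infix_tokens_spec : Claim_unchanged_to_infix_tokens := by
  intro infix_str po _ hD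
  show to_infix_tokens infix_str po = to_infix_tokens_alt infix_str po
  have H : ∀ c ∈ infix_str.toList,
      PySem.Set.contains (pvOps po) (String.ofList [c]) = true → c ≠ ' ' := by
    intro c hc hct
    rintro rfl
    rcases (contains_pvOps_iff po (String.ofList [' '])).mp hct with hmem | h' | h'
    · rcases List.mem_map.mp hmem with ⟨p, hp, hps⟩
      exact hD ⟨⟨p, hp, hps⟩, hc⟩
    all_goals exact absurd h' (by decide)
  have hmain := mainLoop (pvOps po) infix_str.toList H [] [] [] (Or.inl rfl) (by simp) rfl
  simp only [List.nil_append, ne_eq, not_true_eq_false, decide_false] at hmain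
  unfold to_infix_tokens to_infix_tokens_alt
  show (((PySem.Chars.splitOn ((infix_str.toList.foldl (pvStepA (pvOps po)) (false, [])).2 ++ [' ']) [' ']).filter
      (fun t => decide (0 < t.length))).map String.ofList) =
    ((if (infix_str.toList.foldl (pvStepB (pvOps po)) ([], [])).2 ≠ [] then
        (infix_str.toList.foldl (pvStepB (pvOps po)) ([], [])).1 ++
          [(infix_str.toList.foldl (pvStepB (pvOps po)) ([], [])).2]
      else (infix_str.toList.foldl (pvStepB (pvOps po)) ([], [])).1).map String.ofList)
  rw [splitOn_space]
  exact congrArg (List.map String.ofList) hmain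

-- A's tokens are split on ' ', so none of them contains a space
lemma mySplit_no_space (l : List Char) : ∀ t ∈ mySplit l, ' ' ∉ t := by
  induction l with
  | nil => intro t ht; simp [mySplit] at ht; simp [ht]
  | cons c rest ih =>
    intro t ht
    simp only [mySplit] at ht
    split_ifs at ht with hc
    · rcases List.mem_cons.mp ht with rfl | h
      · simp
      · exact ih t h
    · cases hms : mySplit rest with
      | nil => exact absurd hms (mySplit_ne_nil rest)
      | cons a tl =>
        rw [hms] at ht
        rcases List.mem_cons.mp ht with rfl | h
        · intro hsp
          rcases List.mem_cons.mp hsp with h' | h'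
          · exact hc h'.symm
          · exact ih a (by rw [hms]; exact List.mem_cons_self ..) h'
        · exact ih t (by rw [hms]; exact List.mem_cons_of_mem _ h)

-- B's token list only grows
lemma stepB_mono (ops : PySem.Set String) (cs : List Char) :
    ∀ (toks : List (List Char)) (buf : List Char),
      ∃ rest, (cs.foldl (pvStepB ops) (toks, buf)).1 = toks ++ rest := by
  induction cs with
  | nil => intro toks buf; exact ⟨[], by simp⟩
  | cons c cs ih =>
    intro toks buf
    simp only [List.foldl_cons, pvStepB]
    by_cases h1 : PySem.Set.contains ops (String.ofList [c]) = true
    · rw [if_pos h1]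
      rcases ih ((if buf ≠ [] then toks ++ [buf] else toks) ++ [[c]]) [] with ⟨rest, hrest⟩
      refine ⟨(if buf ≠ [] then [buf] else []) ++ [[c]] ++ rest, ?_⟩
      rw [hrest]
      cases buf <;> simp
    · rw [if_neg h1]
      by_cases h2 : (PySem.Chars.isdigit c || c = '.') = true
      · rw [if_pos h2]; exact ih toks (buf ++ [c])
      · rw [if_neg h2]; exact ih toks buf

-- once a space operator occurs, B's output contains the token [' ']
lemma stepB_space_mem (ops : PySem.Set String) (hops : PySem.Set.contains ops (String.ofList [' ']) = true)
    (cs : List Char) :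
    ∀ (toks : List (List Char)) (buf : List Char), ' ' ∈ cs →
      [' '] ∈ (cs.foldl (pvStepB ops) (toks, buf)).1 := by
  induction cs with
  | nil => intro _ _ h; simp at h
  | cons c cs ih =>
    intro toks buf hmem
    simp only [List.foldl_cons, pvStepB]
    by_cases hc : c = ' '
    · subst hc
      simp only [hops, if_true]
      rcases stepB_mono ops cs ((if buf ≠ [] then toks ++ [buf] else toks) ++ [[' ']]) [] with ⟨rest, hrest⟩
      rw [hrest]
      exact List.mem_append_left _ (List.mem_append_right _ (List.mem_singleton.mpr rfl))
    · have hmem' : ' ' ∈ cs := by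
        rcases List.mem_cons.mp hmem with h | h
        · exact absurd h.symm hc
        · exact h
      by_cases h1 : PySem.Set.contains ops (String.ofList [c]) = true
      · rw [if_pos h1]; exact ih _ _ hmem'
      · rw [if_neg h1]
        by_cases h2 : (PySem.Chars.isdigit c || c = '.') = true
        · rw [if_pos h2]; exact ih _ _ hmem'
        · rw [if_neg h2]; exact ih _ _ hmem'

theorem to_infix_tokens_tight : Claim_exact_to_infix_tokens := by
  intro infix_str po _ hD heq
  rcases hD with ⟨⟨p, hp, hps⟩, hsp⟩
  have hops : PySem.Set.contains (pvOps po) (String.ofList [' ']) = true :=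
    (contains_pvOps_iff po (String.ofList [' '])).mpr
      (Or.inl (List.mem_map.mpr ⟨p, hp, by rw [hps]⟩))
  -- " " is a token of B's output …
  have hB : (" " : String) ∈ to_infix_tokens_alt infix_str po := by
    unfold to_infix_tokens_alt
    have hm := stepB_space_mem (pvOps po) hops infix_str.toList [] [] hsp
    show (" " : String) ∈ (if (infix_str.toList.foldl (pvStepB (pvOps po)) ([], [])).2 ≠ [] then
        (infix_str.toList.foldl (pvStepB (pvOps po)) ([], [])).1 ++
          [(infix_str.toList.foldl (pvStepB (pvOps po)) ([], [])).2]
      else (infix_str.toList.foldl (pvStepB (pvOps po)) ([], [])).1).map String.ofList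
    have : (" " : String) = String.ofList [' '] := rfl
    rw [this]
    split_ifs
    · exact List.mem_map.mpr ⟨[' '], List.mem_append_left _ hm, rfl⟩
    · exact List.mem_map.mpr ⟨[' '], hm, rfl⟩
  -- … but never a token of A's output
  have hA : (" " : String) ∉ to_infix_tokens infix_str po := by
    unfold to_infix_tokens
    show (" " : String) ∉ (((PySem.Chars.splitOn ((infix_str.toList.foldl (pvStepA (pvOps po)) (false, [])).2 ++ [' ']) [' ']).filter
        (fun t => decide (0 < t.length))).map String.ofList)
    rw [splitOn_space]
    intro hmem
    rcases List.mem_map.mp hmem with ⟨t, htm, hts⟩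
    have ht : t ∈ mySplit ((infix_str.toList.foldl (pvStepA (pvOps po)) (false, [])).2 ++ [' ']) :=
      List.mem_of_mem_filter htm
    have hteq : t = [' '] := by
      have := congrArg String.toList hts
      simpa using this
    exact mySplit_no_space _ t ht (by rw [hteq]; exact List.mem_singleton.mpr rfl)
  rw [heq] at hA
  exact hA hB

theorem to_infix_tokens_changed : Claim_changed_to_infix_tokens := by
  unfold Claim_changed_to_infix_tokens; decide
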